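-- pv_equiv track=rewrite | github.com/Tejas-Chakkarwar/Tejas-Chakkarwar | research_feasibility_agent/modules/market_analyzer.py | _identify_adoption_barriers
-- ===== SOURCE A (Python) =====
-- from typing import List, Dict, Tuple
--
-- def _identify_adoption_barriers(text: str) -> List[str]:
--     """Identify barriers to market adoption"""
--     barriers = []
--
--     # Technology barriers
--     if any(word in text for word in ["complex", "complicated", "difficult"]):
--         barriers.append("High complexity may hinder user adoption")
--
--     if "integration" in text:
--         barriers.append("Integration with existing systems may be challenging")
--
--     # Cost barriers
--     if any(word in text for word in ["expensive", "high cost", "premium"]):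
--         barriers.append("High cost may limit addressable market")
--
--     # Behavioral barriers
--     if "behavior change" in text or "habit" in text:
--         barriers.append("Requires user behavior change - typically slow adoption")
--
--     # Network effects
--     if any(word in text for word in ["network effect", "two-sided", "marketplace"]):
--         barriers.append("Chicken-and-egg problem - needs critical mass to be valuable")
--
--     # Regulatory barriers
--     if "regulatory approval" in text or "compliance" in text:
--         barriers.append("Regulatory approval process may delay market entry")
--
--     # Privacy/security concerns
--     if any(word in text for word in ["privacy", "security", "data collection"]):
--         barriers.append("Privacy and security concerns may create adoption resistance")
--
--     # Switching costs
--     if "switching" in text or "migration" in text: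
--         barriers.append("High switching costs from existing solutions")
--
--     # Education needed
--     if any(word in text for word in ["novel", "innovative", "new approach"]):
--         barriers.append("Market education required - people don't know they need it yet")
--
--     # Infrastructure dependencies
--     if any(word in text for word in ["requires", "depends on", "needs"]):
--         barriers.append("Dependencies on external infrastructure or platforms")
--
--     return barriers
-- ===== SOURCE B (Python) =====
-- from typing import List
--
-- # Ordered rule table: (keywords, barrier message).
-- _RULES = [
--     (["complex", "complicated", "difficult"], "High complexity may hinder user adoption"),
--     (["integration"], "Integration with existing systems may be challenging"),
--     (["expensive", "high cost", "premium"], "High cost may limit addressable market"),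
--     (["behavior change", "habit"], "Requires user behavior change - typically slow adoption"),
--     (["network effect", "two-sided", "marketplace"], "Chicken-and-egg problem - needs critical mass to be valuable"),
--     (["regulatory approval", "compliance"], "Regulatory approval process may delay market entry"),
--     (["privacy", "security", "data collection"], "Privacy and security concerns may create adoption resistance"),
--     (["switching", "migration"], "High switching costs from existing solutions"),
--     (["novel", "innovative", "new approach"], "Market education required - people don't know they need it yet"),
--     (["requires", "depends on", "needs"], "Dependencies on external infrastructure or platforms"),
-- ]
--
-- _ALL_KEYWORDS = [w for kws, _ in _RULES for w in kws]
--
-- def _identify_adoption_barriers(text: str) -> List[str]: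
--     # Single scan over the text: at each position collect every keyword that
--     # starts there; then a lookup pass over the rules that never reads the text.
--     matched = set()
--     for i in range(len(text)):
--         for w in _ALL_KEYWORDS:
--             if text.startswith(w, i):
--                 matched.add(w)
--     return [msg for kws, msg in _RULES if any(w in matched for w in kws)]
-- ===== Notes on version B (the rewrite author's own statement) =====
-- stated objective: alternative
-- what changed: Instead of ten per-rule substring searches over the text, B makes one scan over the text positions building the set of keywords that match anywhere (startswith at each offset), then filters a rule table against that set without touching the text again.
import Mathlib
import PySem

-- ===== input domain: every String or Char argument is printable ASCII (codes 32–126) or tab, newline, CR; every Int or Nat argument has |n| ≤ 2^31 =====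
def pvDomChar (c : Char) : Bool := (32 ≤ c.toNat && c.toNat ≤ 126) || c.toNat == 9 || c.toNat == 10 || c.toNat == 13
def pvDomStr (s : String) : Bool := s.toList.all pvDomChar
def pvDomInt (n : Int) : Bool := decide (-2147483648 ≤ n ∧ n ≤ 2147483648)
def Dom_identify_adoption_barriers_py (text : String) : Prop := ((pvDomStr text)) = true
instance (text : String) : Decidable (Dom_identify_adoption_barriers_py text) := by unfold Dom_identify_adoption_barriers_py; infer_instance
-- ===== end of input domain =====

-- B replaces A's ten per-rule substring searches by one scan over the text positions that
-- builds the set of keywords matching anywhere, then a rule-table lookup pass (objective: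
-- alternative); same return value.

-- ===== PORT A =====
def identify_adoption_barriers_py (text : String) : List String :=
  let barriers : List String := []
  let barriers := if (["complex", "complicated", "difficult"].any fun w => PySem.Str.isIn w text) then
    barriers ++ ["High complexity may hinder user adoption"] else barriers
  let barriers := if PySem.Str.isIn "integration" text then
    barriers ++ ["Integration with existing systems may be challenging"] else barriers
  let barriers := if (["expensive", "high cost", "premium"].any fun w => PySem.Str.isIn w text) then
    barriers ++ ["High cost may limit addressable market"] else barriers
  let barriers := if (PySem.Str.isIn "behavior change" text || PySem.Str.isIn "habit" text) then
    barriers ++ ["Requires user behavior change - typically slow adoption"] else barriers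
  let barriers := if (["network effect", "two-sided", "marketplace"].any fun w => PySem.Str.isIn w text) then
    barriers ++ ["Chicken-and-egg problem - needs critical mass to be valuable"] else barriers
  let barriers := if (PySem.Str.isIn "regulatory approval" text || PySem.Str.isIn "compliance" text) then
    barriers ++ ["Regulatory approval process may delay market entry"] else barriers
  let barriers := if (["privacy", "security", "data collection"].any fun w => PySem.Str.isIn w text) then
    barriers ++ ["Privacy and security concerns may create adoption resistance"] else barriers
  let barriers := if (PySem.Str.isIn "switching" text || PySem.Str.isIn "migration" text) then
    barriers ++ ["High switching costs from existing solutions"] else barriers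
  let barriers := if (["novel", "innovative", "new approach"].any fun w => PySem.Str.isIn w text) then
    barriers ++ ["Market education required - people don't know they need it yet"] else barriers
  let barriers := if (["requires", "depends on", "needs"].any fun w => PySem.Str.isIn w text) then
    barriers ++ ["Dependencies on external infrastructure or platforms"] else barriers
  barriers

-- ===== PORT B =====
def pvBarrierRules : List (List String × String) :=
  [ (["complex", "complicated", "difficult"], "High complexity may hinder user adoption"),
    (["integration"], "Integration with existing systems may be challenging"),
    (["expensive", "high cost", "premium"], "High cost may limit addressable market"),
    (["behavior change", "habit"], "Requires user behavior change - typically slow adoption"),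
    (["network effect", "two-sided", "marketplace"], "Chicken-and-egg problem - needs critical mass to be valuable"),
    (["regulatory approval", "compliance"], "Regulatory approval process may delay market entry"),
    (["privacy", "security", "data collection"], "Privacy and security concerns may create adoption resistance"),
    (["switching", "migration"], "High switching costs from existing solutions"),
    (["novel", "innovative", "new approach"], "Market education required - people don't know they need it yet"),
    (["requires", "depends on", "needs"], "Dependencies on external infrastructure or platforms") ]

def pvAllKeywords : List String := pvBarrierRules.flatMap (·.1)

-- text.startswith(w, i) for 0 ≤ i is ported exactly as w.toList.isPrefixOf (text.toList.drop i)
def identify_adoption_barriers_py_alt (text : String) : List String :=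
  let cs := text.toList
  let matched : PySem.Set String :=
    (List.range cs.length).foldl (fun acc i =>
      pvAllKeywords.foldl (fun acc w =>
        if w.toList.isPrefixOf (cs.drop i) then PySem.Set.add acc w else acc) acc) PySem.Set.empty
  (pvBarrierRules.filter (fun r => r.1.any fun w => PySem.Set.contains matched w)).map (·.2)

-- ===== PRECONDITION & SPEC =====
def Spec_identify_adoption_barriers_py (text : String) (out : List String) : Prop := out = identify_adoption_barriers_py_alt text
instance (text : String) (out : List String) : Decidable (Spec_identify_adoption_barriers_py text out) := by unfold Spec_identify_adoption_barriers_py; infer_instance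

-- ===== CLAIM (what is proved, stated in full; the proofs are below) =====
def Claim_equal_identify_adoption_barriers_py : Prop := ∀ (text : String), Dom_identify_adoption_barriers_py text → Spec_identify_adoption_barriers_py text (identify_adoption_barriers_py text)

-- ===== LEMMAS AND PROOFS =====

theorem pv_any_congr {ws : List String} {p q : String → Bool} (h : ∀ w ∈ ws, p w = q w) :
    ws.any p = ws.any q := by
  induction ws with
  | nil => rfl
  | cons w t ih =>
    simp only [List.any_cons, h w List.mem_cons_self,
      ih (fun v hv => h v (List.mem_cons_of_mem _ hv))]

-- membership after the inner keyword fold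
theorem pv_mem_inner (kws : List String) (p : String → Bool) (acc : PySem.Set String) (w : String) :
    w ∈ (kws.foldl (fun acc w => if p w then PySem.Set.add acc w else acc) acc)
      ↔ (w ∈ acc ∨ ∃ v ∈ kws, v = w ∧ p v) := by
  induction kws generalizing acc with
  | nil => simp
  | cons v t ih =>
    simp only [List.foldl_cons]
    by_cases hp : p v
    · rw [if_pos hp, ih]
      constructor
      · rintro (h | ⟨x, hx, rfl, hq⟩)
        · rcases (PySem.Set.mem_add _ _ _).mp h with h | rfl
          · exact Or.inl h
          · exact Or.inr ⟨w, List.mem_cons_self, rfl, hp⟩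
        · exact Or.inr ⟨x, List.mem_cons_of_mem _ hx, rfl, hq⟩
      · rintro (h | ⟨x, hx, rfl, hq⟩)
        · exact Or.inl ((PySem.Set.mem_add _ _ _).mpr (Or.inl h))
        · rcases List.mem_cons.mp hx with rfl | hx
          · exact Or.inl ((PySem.Set.mem_add _ _ _).mpr (Or.inr rfl))
          · exact Or.inr ⟨x, hx, rfl, hq⟩
    · rw [if_neg hp, ih]
      constructor
      · rintro (h | ⟨x, hx, rfl, hq⟩)
        · exact Or.inl h
        · exact Or.inr ⟨x, List.mem_cons_of_mem _ hx, rfl, hq⟩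
      · rintro (h | ⟨x, hx, rfl, hq⟩)
        · exact Or.inl h
        · rcases List.mem_cons.mp hx with rfl | hx
          · exact absurd hq hp
          · exact Or.inr ⟨x, hx, rfl, hq⟩

-- membership after the outer position fold
theorem pv_mem_outer (idxs : List Nat) (q : String → Nat → Bool) (acc : PySem.Set String) (w : String) :
    w ∈ (idxs.foldl (fun acc i =>
        pvAllKeywords.foldl (fun acc v => if q v i then PySem.Set.add acc v else acc) acc) acc)
      ↔ (w ∈ acc ∨ ∃ i ∈ idxs, ∃ v ∈ pvAllKeywords, v = w ∧ q v i) := by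
  induction idxs generalizing acc with
  | nil => simp
  | cons i t ih =>
    simp only [List.foldl_cons, ih, pv_mem_inner]
    constructor
    · rintro ((h | ⟨v, hv, rfl, hq⟩) | ⟨j, hj, v, hv, rfl, hq⟩)
      · exact Or.inl h
      · exact Or.inr ⟨i, by simp, v, hv, rfl, hq⟩
      · exact Or.inr ⟨j, by simp [hj], v, hv, rfl, hq⟩
    · rintro (h | ⟨j, hj, v, hv, rfl, hq⟩)
      · exact Or.inl (Or.inl h)
      · rcases List.mem_cons.mp hj with rfl | hj
        · exact Or.inl (Or.inr ⟨v, hv, rfl, hq⟩)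
        · exact Or.inr ⟨j, hj, v, hv, rfl, hq⟩

-- for a nonempty keyword, matching at some position below the length ↔ Python 'w in text'
theorem pv_matched_iff (text : String) (w : String) (hw : w.toList ≠ []) :
    (∃ i, i < text.toList.length ∧ w.toList <+: text.toList.drop i) ↔ PySem.Str.isIn w text = true := by
  rw [PySem.Str.isIn_eq, ← PySem.Chars.exists_prefix_drop_iff_isIn]
  constructor
  · rintro ⟨i, _, hp⟩; exact ⟨i, hp⟩
  · rintro ⟨j, hj⟩
    refine ⟨j, ?_, hj⟩
    by_contra hge
    rw [Nat.not_lt] at hge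
    rw [List.drop_eq_nil_of_le hge] at hj
    exact hw (List.prefix_nil.mp hj)

-- B's set-scan condition coincides with Python 'w in text' per rule
theorem pv_alt_eq (text : String) :
    identify_adoption_barriers_py_alt text
      = (pvBarrierRules.filter (fun r => r.1.any fun w => PySem.Str.isIn w text)).map (·.2) := by
  simp only [identify_adoption_barriers_py_alt]
  congr 1
  apply List.filter_congr
  intro r hr
  apply pv_any_congr
  intro w hw
  have hwAll : w ∈ pvAllKeywords := List.mem_flatMap.mpr ⟨r, hr, hw⟩
  have hne : w.toList ≠ [] := by fin_cases hwAll <;> decide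
  have hmem : w ∈ ((List.range text.toList.length).foldl (fun acc i =>
        pvAllKeywords.foldl (fun acc v =>
          if v.toList.isPrefixOf (text.toList.drop i) then PySem.Set.add acc v else acc) acc)
        PySem.Set.empty) ↔ PySem.Str.isIn w text = true := by
    rw [pv_mem_outer (q := fun v i => v.toList.isPrefixOf (text.toList.drop i))]
    rw [← pv_matched_iff text w hne]
    constructor
    · rintro (h | ⟨i, hi, v, _, rfl, hq⟩)
      · simp [PySem.Set.empty] at h
      · exact ⟨i, List.mem_range.mp hi, List.isPrefixOf_iff_prefix.mp hq⟩
    · rintro ⟨i, hi, hp⟩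
      exact Or.inr ⟨i, List.mem_range.mpr hi, w, hwAll, rfl, List.isPrefixOf_iff_prefix.mpr hp⟩
  rcases h : PySem.Str.isIn w text with _ | _
  · rw [Bool.eq_false_iff]
    intro hc
    have hc' := hmem.mp (by simpa using hc)
    rw [h] at hc'; exact Bool.false_ne_true hc'
  · simpa using hmem.mpr h

-- ===== VERDICT (by name: the statement is the Claim_ definition above) =====
theorem identify_adoption_barriers_py_spec : Claim_equal_identify_adoption_barriers_py := by
  intro text _
  unfold Spec_identify_adoption_barriers_py identify_adoption_barriers_py
  rw [pv_alt_eq]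
  unfold pvBarrierRules
  simp only [List.filter_cons, List.filter_nil,
    List.any_cons, List.any_nil, Bool.or_false]
  generalize (PySem.Str.isIn "complex" text || (PySem.Str.isIn "complicated" text || PySem.Str.isIn "difficult" text)) = b1
  generalize (PySem.Str.isIn "integration" text) = b2
  generalize (PySem.Str.isIn "expensive" text || (PySem.Str.isIn "high cost" text || PySem.Str.isIn "premium" text)) = b3
  generalize (PySem.Str.isIn "behavior change" text || PySem.Str.isIn "habit" text) = b4
  generalize (PySem.Str.isIn "network effect" text || (PySem.Str.isIn "two-sided" text || PySem.Str.isIn "marketplace" text)) = b5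
  generalize (PySem.Str.isIn "regulatory approval" text || PySem.Str.isIn "compliance" text) = b6
  generalize (PySem.Str.isIn "privacy" text || (PySem.Str.isIn "security" text || PySem.Str.isIn "data collection" text)) = b7
  generalize (PySem.Str.isIn "switching" text || PySem.Str.isIn "migration" text) = b8
  generalize (PySem.Str.isIn "novel" text || (PySem.Str.isIn "innovative" text || PySem.Str.isIn "new approach" text)) = b9
  generalize (PySem.Str.isIn "requires" text || (PySem.Str.isIn "depends on" text || PySem.Str.isIn "needs" text)) = b10
  revert b1 b2 b3 b4 b5 b6 b7 b8 b9 b10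
  decide
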